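-- pv_equiv track=rewrite | github.com/JoepH123/2AMU10_Group35_Sudoku | deliverables/team35_A2/hard_coded_moves.py | filter_out_subsets
-- ===== SOURCE A (Python) =====
-- def filter_out_subsets(paths, N):
--     """
--     Remove redundant paths (subsets of larger paths) and reintroduce boundary coordinates.
--
--     Parameters:
--     - paths: List of paths to filter.
--     - N: Size of the grid.
--
--     Returns:
--     - Filtered list of paths with reintroduced boundary coordinates.
--     """
--     filtered_lists = []
--     removed_coords = []
--
--     #remove cells from path that are adjacent to the wall
--     for coord_list in paths:
--         new_list = []
--         removed = []
--         for (r, c) in coord_list: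
--             if c == 0 or c == N-1:
--                 removed.append((r, c))
--             else:
--                 new_list.append((r,c))
--         filtered_lists.append(new_list)
--         removed_coords.append(removed)
--
--     # remove subset lists
--     set_lists = [set(lst) for lst in filtered_lists]
--
--     #check if a path is a subset
--     to_remove = set()
--     for i, s1 in enumerate(set_lists):
--         for j, s2 in enumerate(set_lists):
--             if i != j and s1 < s2:  # s1 is strictly contained in s2
--                 to_remove.add(i)
--
--     final_filtered_lists = [lst for i, lst in enumerate(filtered_lists) if i not in to_remove]
--     final_removed_coords = [rm for i, rm in enumerate(removed_coords) if i not in to_remove]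
--
--     # reintroduce original boundary coordinates
--     restored_lists = []
--     for coords, removed in zip(final_filtered_lists, final_removed_coords):
--         restored_list = coords + removed
--         restored_lists.append(restored_list)
--     return restored_lists
-- ===== SOURCE B (Python) =====
-- def filter_out_subsets(paths, N):
--     n = len(paths)
--     interiors = [[(r, c) for (r, c) in p if c != 0 and c != N - 1] for p in paths]
--     boundaries = [[(r, c) for (r, c) in p if c == 0 or c == N - 1] for p in paths]
--     sets = [set(x) for x in interiors]
--     order = sorted(range(n), key=lambda i: len(sets[i]))
--     to_remove = set()
--     for p, i in enumerate(order):
--         if any(len(sets[i]) < len(sets[j]) and sets[i] <= sets[j] for j in order[p + 1:]):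
--             to_remove.add(i)
--     return [interiors[i] + boundaries[i] for i in range(n) if i not in to_remove]
-- ===== Notes on version B (the rewrite author's own statement) =====
-- stated objective: alternative
-- what changed: The all-pairs strict-subset scan over the interior sets is replaced by a size-sorted index order in which each set is tested for containment only against the strictly larger sets that follow it, and the output is rebuilt by filtering original indices instead of filtering and re-zipping two parallel lists.
import Mathlib
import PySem

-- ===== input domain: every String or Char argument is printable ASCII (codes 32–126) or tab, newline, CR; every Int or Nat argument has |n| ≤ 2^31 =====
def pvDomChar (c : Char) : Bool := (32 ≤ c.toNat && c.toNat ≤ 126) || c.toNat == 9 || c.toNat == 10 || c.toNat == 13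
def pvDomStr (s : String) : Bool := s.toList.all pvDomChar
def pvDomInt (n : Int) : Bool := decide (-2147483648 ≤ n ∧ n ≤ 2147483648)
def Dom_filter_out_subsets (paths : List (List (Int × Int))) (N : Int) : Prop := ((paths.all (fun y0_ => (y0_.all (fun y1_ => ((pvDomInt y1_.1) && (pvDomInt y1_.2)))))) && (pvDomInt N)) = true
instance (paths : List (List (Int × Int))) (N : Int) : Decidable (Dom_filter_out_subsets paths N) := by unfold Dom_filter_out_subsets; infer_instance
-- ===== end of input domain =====

-- B keeps A's boundary-splitting but replaces the all-pairs strict-subset scan by a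
-- size-sorted scan that tests containment only against strictly larger sets (alternative decomposition).


-- ===== PORT A =====
-- inner loop of A: split one coord_list into (new_list, removed)
def pvSplitA (N : Int) (coord_list : List (Int × Int)) : List (Int × Int) × List (Int × Int) :=
  coord_list.foldl (fun st rc =>
    if rc.2 = 0 ∨ rc.2 = N - 1 then (st.1, st.2 ++ [rc]) else (st.1 ++ [rc], st.2)) ([], [])

def filter_out_subsets (paths : List (List (Int × Int))) (N : Int) : List (List (Int × Int)) :=
  let fr := paths.foldl (fun st cl =>
      (st.1 ++ [(pvSplitA N cl).1], st.2 ++ [(pvSplitA N cl).2]))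
    (([], []) : List (List (Int × Int)) × List (List (Int × Int)))
  let filtered_lists := fr.1
  let removed_coords := fr.2
  let set_lists := filtered_lists.map (fun lst => PySem.Set.ofList lst)
  -- s1 < s2 (proper subset) is s1 <= s2 and s1 != s2
  let to_remove : PySem.Set Int :=
    (PySem.List.enumerate set_lists).foldl (fun tr p1 =>
      (PySem.List.enumerate set_lists).foldl (fun tr p2 =>
        if p1.1 ≠ p2.1 ∧ (PySem.Set.issubset p1.2 p2.2 && !(PySem.Set.equal p1.2 p2.2)) = true
        then PySem.Set.add tr p1.1 else tr) tr)
      PySem.Set.empty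
  let final_filtered := ((PySem.List.enumerate filtered_lists).filter
      (fun p => !(PySem.Set.contains to_remove p.1))).map (fun p => p.2)
  let final_removed := ((PySem.List.enumerate removed_coords).filter
      (fun p => !(PySem.Set.contains to_remove p.1))).map (fun p => p.2)
  (final_filtered.zip final_removed).foldl (fun acc p => acc ++ [p.1 ++ p.2]) []

-- ===== PORT B =====
def filter_out_subsets_alt (paths : List (List (Int × Int))) (N : Int) : List (List (Int × Int)) :=
  let n : Int := PySem.List.len paths
  let interiors := paths.map (fun p => p.filter (fun rc => decide (rc.2 ≠ 0 ∧ rc.2 ≠ N - 1)))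
  let boundaries := paths.map (fun p => p.filter (fun rc => decide (rc.2 = 0 ∨ rc.2 = N - 1)))
  let sets := interiors.map (fun x => PySem.Set.ofList x)
  let order := PySem.List.sorted (PySem.List.pyRange 0 n)
      (fun i => PySem.Set.len (PySem.List.pyGetD sets i []))
  let to_remove : PySem.Set Int :=
    (PySem.List.enumerate order).foldl (fun tr pi =>
      if (PySem.List.slice order (some (pi.1 + 1)) none).any (fun j =>
            decide (PySem.Set.len (PySem.List.pyGetD sets pi.2 []) <
                    PySem.Set.len (PySem.List.pyGetD sets j [])) &&
            PySem.Set.issubset (PySem.List.pyGetD sets pi.2 []) (PySem.List.pyGetD sets j []))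
      then PySem.Set.add tr pi.2 else tr) PySem.Set.empty
  ((PySem.List.pyRange 0 n).filter (fun i => !(PySem.Set.contains to_remove i))).map
    (fun i => PySem.List.pyGetD interiors i [] ++ PySem.List.pyGetD boundaries i [])

-- ===== PRECONDITION & SPEC =====
def Spec_filter_out_subsets (paths : List (List (Int × Int))) (N : Int) (out : List (List (Int × Int))) : Prop := out = filter_out_subsets_alt paths N
instance (paths : List (List (Int × Int))) (N : Int) (out : List (List (Int × Int))) : Decidable (Spec_filter_out_subsets paths N out) := by unfold Spec_filter_out_subsets; infer_instance

-- ===== CLAIM (what is proved, stated in full; the proofs are below) =====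
def Claim_equal_filter_out_subsets : Prop := ∀ (paths : List (List (Int × Int))) (N : Int), Dom_filter_out_subsets paths N → Spec_filter_out_subsets paths N (filter_out_subsets paths N)


-- ===== LEMMAS AND PROOFS =====

-- the boundary predicate of both programs
def pvBd (N : Int) (rc : Int × Int) : Bool := decide (rc.2 = 0 ∨ rc.2 = N - 1)

theorem pv_split_acc (N : Int) (l : List (Int × Int)) (a b : List (Int × Int)) :
    l.foldl (fun st rc =>
        if rc.2 = 0 ∨ rc.2 = N - 1 then (st.1, st.2 ++ [rc]) else (st.1 ++ [rc], st.2)) (a, b)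
    = (a ++ l.filter (fun rc => !pvBd N rc), b ++ l.filter (pvBd N)) := by
  induction l generalizing a b with
  | nil => simp
  | cons x xs ih =>
    by_cases h : x.2 = 0 ∨ x.2 = N - 1 <;>
      simp [List.filter_cons, pvBd, h, ih] <;> tauto

theorem pv_outer_acc (N : Int) (ps : List (List (Int × Int))) (a b : List (List (Int × Int))) :
    ps.foldl (fun st cl =>
        (st.1 ++ [(pvSplitA N cl).1], st.2 ++ [(pvSplitA N cl).2])) (a, b)
    = (a ++ ps.map (fun cl => cl.filter (fun rc => !pvBd N rc)),
       b ++ ps.map (fun cl => cl.filter (pvBd N))) := by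
  induction ps generalizing a b with
  | nil => simp
  | cons x xs ih =>
    have hx : pvSplitA N x = (x.filter (fun rc => !pvBd N rc), x.filter (pvBd N)) := by
      simpa [pvSplitA] using pv_split_acc N x [] []
    simp only [List.foldl_cons]
    rw [ih, hx]
    simp

theorem pv_memA_inner (l2 : List (Int × PySem.Set (Int × Int))) (p1 : Int × PySem.Set (Int × Int))
    (s : PySem.Set Int) (v : Int) :
    (v ∈ l2.foldl (fun tr p2 =>
        if p1.1 ≠ p2.1 ∧ (PySem.Set.issubset p1.2 p2.2 && !(PySem.Set.equal p1.2 p2.2)) = true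
        then PySem.Set.add tr p1.1 else tr) s)
    ↔ v ∈ s ∨ (p1.1 = v ∧ ∃ p2 ∈ l2,
        p1.1 ≠ p2.1 ∧ (PySem.Set.issubset p1.2 p2.2 && !(PySem.Set.equal p1.2 p2.2)) = true) := by
  induction l2 generalizing s with
  | nil => simp
  | cons y ys ih =>
    by_cases h : p1.1 ≠ y.1 ∧ (PySem.Set.issubset p1.2 y.2 && !(PySem.Set.equal p1.2 y.2)) = true
    · simp only [List.foldl_cons, if_pos h, ih, PySem.Set.mem_add]
      constructor
      · rintro (⟨hs | he⟩ | ⟨hv, p2, hp2, hc⟩)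
        · exact Or.inl hs
        · exact Or.inr ⟨he.symm, y, List.mem_cons_self, h⟩
        · exact Or.inr ⟨hv, p2, List.mem_cons_of_mem _ hp2, hc⟩
      · rintro (hs | ⟨hv, p2, hp2, hc⟩)
        · exact Or.inl (Or.inl hs)
        · rcases List.mem_cons.mp hp2 with rfl | hp2
          · exact Or.inl (Or.inr hv.symm)
          · exact Or.inr ⟨hv, p2, hp2, hc⟩
    · simp only [List.foldl_cons, if_neg h, ih]
      constructor
      · rintro (hs | ⟨hv, p2, hp2, hc⟩)
        · exact Or.inl hs
        · exact Or.inr ⟨hv, p2, List.mem_cons_of_mem _ hp2, hc⟩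
      · rintro (hs | ⟨hv, p2, hp2, hc⟩)
        · exact Or.inl hs
        · rcases List.mem_cons.mp hp2 with rfl | hp2
          · exact absurd hc h
          · exact Or.inr ⟨hv, p2, hp2, hc⟩

theorem pv_memA (l1 l2 : List (Int × PySem.Set (Int × Int))) (s : PySem.Set Int) (v : Int) :
    (v ∈ l1.foldl (fun tr p1 => l2.foldl (fun tr p2 =>
        if p1.1 ≠ p2.1 ∧ (PySem.Set.issubset p1.2 p2.2 && !(PySem.Set.equal p1.2 p2.2)) = true
        then PySem.Set.add tr p1.1 else tr) tr) s)
    ↔ v ∈ s ∨ ∃ p1 ∈ l1, p1.1 = v ∧ ∃ p2 ∈ l2,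
        p1.1 ≠ p2.1 ∧ (PySem.Set.issubset p1.2 p2.2 && !(PySem.Set.equal p1.2 p2.2)) = true := by
  induction l1 generalizing s with
  | nil => simp
  | cons x xs ih =>
    rw [List.foldl_cons, ih, pv_memA_inner]
    constructor
    · rintro ((hs | hx) | ⟨p1, hp1, hrest⟩)
      · exact Or.inl hs
      · exact Or.inr ⟨x, List.mem_cons_self, hx⟩
      · exact Or.inr ⟨p1, List.mem_cons_of_mem _ hp1, hrest⟩
    · rintro (hs | ⟨p1, hp1, hrest⟩)
      · exact Or.inl (Or.inl hs)
      · rcases List.mem_cons.mp hp1 with rfl | hp1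
        · exact Or.inl (Or.inr hrest)
        · exact Or.inr ⟨p1, hp1, hrest⟩

theorem pv_memB (sets : List (PySem.Set (Int × Int))) (order : List Int)
    (l : List (Int × Int)) (s : PySem.Set Int) (v : Int) :
    (v ∈ l.foldl (fun tr pi =>
        if (PySem.List.slice order (some (pi.1 + 1)) none).any (fun j =>
              decide (PySem.Set.len (PySem.List.pyGetD sets pi.2 []) <
                      PySem.Set.len (PySem.List.pyGetD sets j [])) &&
              PySem.Set.issubset (PySem.List.pyGetD sets pi.2 []) (PySem.List.pyGetD sets j []))
              = true
        then PySem.Set.add tr pi.2 else tr) s)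
    ↔ v ∈ s ∨ ∃ pi ∈ l, pi.2 = v ∧
        (PySem.List.slice order (some (pi.1 + 1)) none).any (fun j =>
              decide (PySem.Set.len (PySem.List.pyGetD sets pi.2 []) <
                      PySem.Set.len (PySem.List.pyGetD sets j [])) &&
              PySem.Set.issubset (PySem.List.pyGetD sets pi.2 []) (PySem.List.pyGetD sets j []))
              = true := by
  induction l generalizing s with
  | nil => simp
  | cons x xs ih =>
    by_cases h : (PySem.List.slice order (some (x.1 + 1)) none).any (fun j =>
              decide (PySem.Set.len (PySem.List.pyGetD sets x.2 []) <
                      PySem.Set.len (PySem.List.pyGetD sets j [])) &&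
              PySem.Set.issubset (PySem.List.pyGetD sets x.2 []) (PySem.List.pyGetD sets j []))
              = true
    · simp only [List.foldl_cons, if_pos h, ih, PySem.Set.mem_add]
      constructor
      · rintro (⟨hs | he⟩ | ⟨pi, hpi, hv, hc⟩)
        · exact Or.inl hs
        · exact Or.inr ⟨x, List.mem_cons_self, he.symm, h⟩
        · exact Or.inr ⟨pi, List.mem_cons_of_mem _ hpi, hv, hc⟩
      · rintro (hs | ⟨pi, hpi, hv, hc⟩)
        · exact Or.inl (Or.inl hs)
        · rcases List.mem_cons.mp hpi with rfl | hpi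
          · exact Or.inl (Or.inr hv.symm)
          · exact Or.inr ⟨pi, hpi, hv, hc⟩
    · simp only [List.foldl_cons, if_neg h, ih]
      constructor
      · rintro (hs | ⟨pi, hpi, hv, hc⟩)
        · exact Or.inl hs
        · exact Or.inr ⟨pi, List.mem_cons_of_mem _ hpi, hv, hc⟩
      · rintro (hs | ⟨pi, hpi, hv, hc⟩)
        · exact Or.inl hs
        · rcases List.mem_cons.mp hpi with rfl | hpi
          · exact absurd hc h
          · exact Or.inr ⟨pi, hpi, hv, hc⟩

theorem pv_card (s t : PySem.Set (Int × Int)) (hs : s.Nodup) (ht : t.Nodup) :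
    ((PySem.Set.issubset s t && !(PySem.Set.equal s t)) = true)
    ↔ (PySem.Set.issubset s t = true ∧ PySem.Set.len s < PySem.Set.len t) := by
  rw [Bool.and_eq_true, Bool.not_eq_true']
  constructor
  · rintro ⟨hsub, hne⟩
    refine ⟨hsub, ?_⟩
    have hsub' : ∀ x ∈ s, x ∈ t := (PySem.Set.issubset_iff s t).mp hsub
    have hne' : ¬ ∀ x, x ∈ s ↔ x ∈ t := by
      intro hall
      exact absurd ((PySem.Set.equal_iff s t).mpr hall) (by simp [hne])
    have hfs : s.toFinset ⊆ t.toFinset := by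
      intro x hx
      simp only [List.mem_toFinset] at *
      exact hsub' x hx
    have hss : s.toFinset ⊂ t.toFinset := by
      rw [Finset.ssubset_iff_of_subset hfs]
      push Not at hne'
      obtain ⟨x, hx⟩ := hne'
      rcases Classical.em (x ∈ s) with hxs | hxs
      · exact absurd (hsub' x hxs) (by tauto)
      · refine ⟨x, ?_, by simpa using hxs⟩
        simp only [List.mem_toFinset]; tauto
    have := Finset.card_lt_card hss
    rw [List.toFinset_card_of_nodup hs, List.toFinset_card_of_nodup ht] at this
    simp only [PySem.Set.len]
    exact_mod_cast this
  · rintro ⟨hsub, hlt⟩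
    refine ⟨hsub, ?_⟩
    rw [Bool.eq_false_iff]
    intro heq
    have hall := (PySem.Set.equal_iff s t).mp heq
    have : s.Perm t := (List.perm_ext_iff_of_nodup hs ht).mpr hall
    have hlen := this.length_eq
    simp only [PySem.Set.len] at hlt
    omega

def pvKey (sl : List (PySem.Set (Int × Int))) (i : Int) : Int :=
  PySem.Set.len (PySem.List.pyGetD sl i [])

def pvM (sl : List (PySem.Set (Int × Int))) (v : Int) : Prop :=
  ∃ m : Int, 0 ≤ m ∧ m < (sl.length : Int) ∧ pvKey sl v < pvKey sl m ∧
    PySem.Set.issubset (PySem.List.pyGetD sl v []) (PySem.List.pyGetD sl m []) = true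

theorem pv_A_iff_M (sl : List (PySem.Set (Int × Int))) (hnd : ∀ s ∈ sl, s.Nodup)
    (v : Int) (hv0 : 0 ≤ v) (hvn : v < (sl.length : Int)) :
    (∃ p1 ∈ PySem.List.enumerate sl, p1.1 = v ∧ ∃ p2 ∈ PySem.List.enumerate sl,
        p1.1 ≠ p2.1 ∧ (PySem.Set.issubset p1.2 p2.2 && !(PySem.Set.equal p1.2 p2.2)) = true)
    ↔ pvM sl v := by
  constructor
  · rintro ⟨p1, hp1, hp1v, p2, hp2, hne, hc⟩
    rw [PySem.List.mem_enumerate_iff] at hp1 hp2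
    obtain ⟨k, hk, rfl⟩ := hp1
    obtain ⟨m, hm, rfl⟩ := hp2
    simp only [zero_add] at hp1v hne hc
    have hcard := (pv_card _ _ (hnd _ (List.getElem_mem hk)) (hnd _ (List.getElem_mem hm))).mp hc
    have hgv : PySem.List.pyGetD sl v [] = sl[k] := by
      rw [PySem.List.pyGetD_eq_getElem sl [] hv0 hvn]
      congr 1; omega
    have hgm : PySem.List.pyGetD sl (m : Int) [] = sl[m] := by
      rw [PySem.List.pyGetD_eq_getElem sl [] (by positivity) (by exact_mod_cast hm)]
      simp
    exact ⟨(m : Int), by positivity, by exact_mod_cast hm,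
      by simp only [pvKey, hgv, hgm]; exact hcard.2, by rw [hgv, hgm]; exact hcard.1⟩
  · rintro ⟨m, hm0, hmn, hklt, hsub⟩
    have hne : v ≠ m := by rintro rfl; omega
    have hgv : PySem.List.pyGetD sl v [] = sl[v.toNat]'(by omega) :=
      PySem.List.pyGetD_eq_getElem sl [] hv0 hvn
    have hgm : PySem.List.pyGetD sl m [] = sl[m.toNat]'(by omega) :=
      PySem.List.pyGetD_eq_getElem sl [] hm0 hmn
    have hcard := (pv_card sl[v.toNat] sl[m.toNat]
        (hnd _ (List.getElem_mem _)) (hnd _ (List.getElem_mem _))).mpr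
      ⟨by rw [← hgv, ← hgm]; exact hsub, by
        have := hklt; simp only [pvKey, hgv, hgm] at this; exact this⟩
    refine ⟨(v.toNat, sl[v.toNat]'(by omega)), ?_, by simp; omega,
            (m.toNat, sl[m.toNat]'(by omega)), ?_, by simp; omega, hcard⟩
    · rw [PySem.List.mem_enumerate_iff]
      exact ⟨v.toNat, by omega, by simp⟩
    · rw [PySem.List.mem_enumerate_iff]
      exact ⟨m.toNat, by omega, by simp⟩

theorem pv_B_iff_M (sl : List (PySem.Set (Int × Int)))
    (v : Int) (hv0 : 0 ≤ v) (hvn : v < (sl.length : Int)) :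
    (∃ pi ∈ PySem.List.enumerate
          (PySem.List.sorted (PySem.List.pyRange 0 (PySem.List.len sl))
            (fun i => PySem.Set.len (PySem.List.pyGetD sl i []))), pi.2 = v ∧
        (PySem.List.slice
            (PySem.List.sorted (PySem.List.pyRange 0 (PySem.List.len sl))
              (fun i => PySem.Set.len (PySem.List.pyGetD sl i [])))
            (some (pi.1 + 1)) none).any (fun j =>
              decide (PySem.Set.len (PySem.List.pyGetD sl pi.2 []) <
                      PySem.Set.len (PySem.List.pyGetD sl j [])) &&
              PySem.Set.issubset (PySem.List.pyGetD sl pi.2 []) (PySem.List.pyGetD sl j []))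
              = true)
    ↔ pvM sl v := by
  have hmemord : ∀ x : Int, x ∈ PySem.List.sorted (PySem.List.pyRange 0 (PySem.List.len sl))
      (fun i => PySem.Set.len (PySem.List.pyGetD sl i [])) ↔ (0 ≤ x ∧ x < (sl.length : Int)) := by
    intro x
    rw [PySem.List.mem_sorted, PySem.List.mem_pyRange_one, PySem.List.len_eq]
  constructor
  · rintro ⟨pi, hpi, hpiv, hany⟩
    rw [PySem.List.mem_enumerate_iff] at hpi
    obtain ⟨p, hp, rfl⟩ := hpi
    simp only [zero_add] at hpiv hany
    rw [List.any_eq_true] at hany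
    obtain ⟨j, hj, hcond⟩ := hany
    have hjb := (hmemord j).mp (PySem.List.mem_of_mem_slice _ _ _ hj)
    rw [Bool.and_eq_true, decide_eq_true_eq] at hcond
    rw [hpiv] at hcond
    exact ⟨j, hjb.1, hjb.2, hcond.1, hcond.2⟩
  · rintro ⟨m, hm0, hmn, hklt, hsub⟩
    simp only [pvKey] at hklt
    have hvord := (hmemord v).mpr ⟨hv0, hvn⟩
    have hmord := (hmemord m).mpr ⟨hm0, hmn⟩
    obtain ⟨p, hp, hop⟩ := List.getElem_of_mem hvord
    obtain ⟨q, hq, hoq⟩ := List.getElem_of_mem hmord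
    have hpg := List.pairwise_iff_getElem.mp
      (PySem.List.sorted_pairwise (PySem.List.pyRange 0 (PySem.List.len sl))
        (fun i => PySem.Set.len (PySem.List.pyGetD sl i [])))
    have hpq : p < q := by
      rcases lt_trichotomy p q with h | h | h
      · exact h
      · exfalso; subst h; rw [hop] at hoq; rw [hoq] at hklt; omega
      · exfalso
        have := hpg q p hq hp h
        rw [hop, hoq] at this
        omega
    refine ⟨(0 + (p : Int), (PySem.List.sorted (PySem.List.pyRange 0 (PySem.List.len sl))
        (fun i => PySem.Set.len (PySem.List.pyGetD sl i [])))[p]'hp), ?_, ?_, ?_⟩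
    · rw [PySem.List.mem_enumerate_iff]
      exact ⟨p, hp, rfl⟩
    · simpa using hop
    · have hcast : ((0 : Int) + (p : Int)) + 1 = ((p + 1 : Nat) : Int) := by push_cast; ring
      rw [hcast, PySem.List.slice_from_natCast, List.any_eq_true]
      have hlt : q - (p + 1) < (List.drop (p + 1) (PySem.List.sorted
          (PySem.List.pyRange 0 (PySem.List.len sl))
          (fun i => PySem.Set.len (PySem.List.pyGetD sl i [])))).length := by
        rw [List.length_drop]; omega
      refine ⟨m, ?_, ?_⟩
      · have hidx : (List.drop (p + 1) (PySem.List.sorted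
            (PySem.List.pyRange 0 (PySem.List.len sl))
            (fun i => PySem.Set.len (PySem.List.pyGetD sl i []))))[q - (p+1)]'hlt = m := by
          rw [List.getElem_drop]
          have : p + 1 + (q - (p+1)) = q := by omega
          simp only [this]
          exact hoq
        exact hidx ▸ List.getElem_mem hlt
      · simp only [hop]
        rw [Bool.and_eq_true, decide_eq_true_eq]
        exact ⟨hklt, hsub⟩

theorem pv_main (paths : List (List (Int × Int))) (N : Int) :
    filter_out_subsets paths N = filter_out_subsets_alt paths N := by
  have hB1 : (fun rc : Int × Int => decide (rc.2 ≠ 0 ∧ rc.2 ≠ N - 1)) = (fun rc => !pvBd N rc) := by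
    funext rc
    by_cases h1 : rc.2 = 0 <;> by_cases h2 : rc.2 = N - 1 <;> simp [pvBd, h1, h2]
  simp only [filter_out_subsets, filter_out_subsets_alt]
  rw [pv_outer_acc N paths [] []]
  simp only [List.nil_append, hB1]
  rw [PySem.List.enumerate_eq_map_pyRange (List.map (fun cl => List.filter (fun rc => !pvBd N rc) cl) paths) ([] : List (Int × Int)),
      PySem.List.enumerate_eq_map_pyRange (List.map (fun cl => List.filter (pvBd N) cl) paths) ([] : List (Int × Int))]
  have hB2 : (fun rc : Int × Int => decide (rc.2 = 0 ∨ rc.2 = N - 1)) = pvBd N := rfl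
  simp only [hB2, PySem.List.len_eq, List.length_map, List.filter_map, List.map_map,
    List.zip_map', PySem.List.foldl_append_singleton_eq_map, List.nil_append, Function.comp_def]
  apply (List.map_congr_left ?_).trans (congrArg _ (List.filter_congr ?_))
  · intro j _
    rfl
  · intro j hj
    rw [PySem.List.mem_pyRange_one] at hj
    obtain ⟨hj0, hjn⟩ := hj
    have hnd : ∀ s ∈ List.map (fun x => PySem.Set.ofList (List.filter (fun rc => !pvBd N rc) x)) paths, s.Nodup := by
      intro s hs
      obtain ⟨x, _, rfl⟩ := List.mem_map.mp hs
      exact PySem.Set.nodup_ofList _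
    have hslen : (List.map (fun x => PySem.Set.ofList (List.filter (fun rc => !pvBd N rc) x)) paths).length = paths.length := by simp
    congr 1
    rw [Bool.eq_iff_iff, PySem.Set.contains_iff, PySem.Set.contains_iff, pv_memA, pv_memB]
    have hA := pv_A_iff_M (List.map (fun x => PySem.Set.ofList (List.filter (fun rc => !pvBd N rc) x)) paths) hnd j hj0 (by rw [hslen]; exact hjn)
    have hB := pv_B_iff_M (List.map (fun x => PySem.Set.ofList (List.filter (fun rc => !pvBd N rc) x)) paths) j hj0 (by rw [hslen]; exact hjn)
    simp only [PySem.List.len_eq, List.length_map] at hA hB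
    simp only [PySem.Set.empty, List.mem_nil_iff, false_or]
    exact hA.trans hB.symm

-- ===== VERDICT (by name: the statement is the Claim_ definition above) =====
theorem filter_out_subsets_spec : Claim_equal_filter_out_subsets := by
  intro paths N _
  unfold Spec_filter_out_subsets
  exact pv_main paths N
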